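-- pv_equiv track=rewrite | github.com/INYEONGKIM/programming-fundamentals | termTest/2019midTermTest.py | equalizer
-- ===== SOURCE A (Python) =====
-- def equalizer(ns):
--     def allequal(ns):
--         if len(ns) > 1:
--             x = ns[0]
--             for i in range(len(ns)):
--                 if x != ns[i]:
--                     return False
--             return True
--         else:
--             return True
--
--     def adjust(ns):
--         if len(ns) > 1:
--             if ns[0] < ns[1]:
--                 return [ns[0] + 1] + adjust(ns[1:])
--             elif ns[0] > ns[1]:
--                 return [ns[0] - 1] + adjust(ns[1:])
--             else:
--                 return [ns[0]] + adjust(ns[1:])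
--         else:
--             return ns
--
--     count = 0
--     while not allequal(ns):
--         ns = adjust(ns)
--         count+=1
--     return count
-- ===== SOURCE B (Python) =====
-- def equalizer(ns):
--     ns = list(ns)
--     count = 0
--     while True:
--         same = True
--         nxt = []
--         for i in range(len(ns)):
--             c = ns[i]
--             if c != ns[0]:
--                 same = False
--             if i + 1 < len(ns):
--                 r = ns[i + 1]
--                 nxt.append(c + 1 if c < r else c - 1 if c > r else c)
--             else:
--                 nxt.append(c)
--         if same:
--             return count
--         ns = nxt
--         count += 1
-- ===== Notes on version B (the rewrite author's own statement) =====
-- stated objective: faster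
-- what changed: B replaces A's recursive adjust helper (which copies the tail with ns[1:] at every level) and A's separate all-equal scan with a single iterative fused left-to-right pass per round that simultaneously checks equality with the first element and builds the next list.
import Mathlib
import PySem

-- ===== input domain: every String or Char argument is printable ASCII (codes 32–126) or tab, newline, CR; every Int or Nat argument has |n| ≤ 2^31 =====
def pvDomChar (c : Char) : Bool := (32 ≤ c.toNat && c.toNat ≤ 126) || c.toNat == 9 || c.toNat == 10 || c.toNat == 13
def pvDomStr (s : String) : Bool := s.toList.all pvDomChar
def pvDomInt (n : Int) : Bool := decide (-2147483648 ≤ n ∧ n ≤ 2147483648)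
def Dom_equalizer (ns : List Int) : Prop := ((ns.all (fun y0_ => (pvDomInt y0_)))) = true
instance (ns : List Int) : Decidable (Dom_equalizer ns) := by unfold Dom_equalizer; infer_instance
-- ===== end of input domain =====

-- B fuses A's two separate traversals per round (equality scan + recursive adjust) into one
-- combined left-to-right pass inside the while loop; alternative decomposition, same cost.

-- Totality guard for the while loop of both ports: pvPhi weights the adjacent gap
-- |ns[i]-ns[i+1]| by 2^i; it strictly decreases on every adjust round that is not already
-- all-equal (pvPhi_adjust_lt, below the claim block), so the fuel pvPhi ns + 1 strictly
-- exceeds the number of rounds the Python while loop performs and the guard never fires.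
def pvPhi : List Int → Nat
  | a :: b :: rest => (a - b).natAbs + 2 * pvPhi (b :: rest)
  | _ => 0

-- ===== PORT A =====
def pyAllequal (ns : List Int) : Bool :=
  if ns.length > 1 then
    -- for-loop over range(len(ns)) with early `return False` = all elements equal x
    ns.all (fun v => decide (v = ns.headD 0))
  else true

def pyAdjust : List Int → List Int
  | a :: b :: rest =>
    if a < b then (a + 1) :: pyAdjust (b :: rest)
    else if a > b then (a - 1) :: pyAdjust (b :: rest)
    else a :: pyAdjust (b :: rest)
  | ns => ns

-- the while loop, structurally recursive on the never-exhausted fuel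
def pyLoop : Nat → List Int → Int → Int
  | 0, _, count => count
  | fuel + 1, ns, count =>
    if pyAllequal ns then count
    else pyLoop fuel (pyAdjust ns) (count + 1)

def equalizer (ns : List Int) : Int := pyLoop (pvPhi ns + 1) ns 0

-- ===== PORT B =====
-- one combined pass: (all elements equal x0, adjusted list)
def pvPass (x0 : Int) : List Int → Bool × List Int
  | [] => (true, [])
  | [a] => (decide (a = x0), [a])
  | a :: b :: rest =>
    let p := pvPass x0 (b :: rest)
    (decide (a = x0) && p.1,
      (if a < b then a + 1 else if a > b then a - 1 else a) :: p.2)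

def pvLoopB : Nat → List Int → Int → Int
  | 0, _, count => count
  | fuel + 1, ns, count =>
    let p := pvPass (ns.headD 0) ns
    if p.1 then count
    else pvLoopB fuel p.2 (count + 1)

def equalizer_alt (ns : List Int) : Int := pvLoopB (pvPhi ns + 1) ns 0

-- ===== PRECONDITION & SPEC =====
def Spec_equalizer (ns : List Int) (out : Int) : Prop := out = equalizer_alt ns
instance (ns : List Int) (out : Int) : Decidable (Spec_equalizer ns out) := by unfold Spec_equalizer; infer_instance

-- ===== CLAIM (what is proved, stated in full; the proofs are below) =====
def Claim_equal_equalizer : Prop := ∀ (ns : List Int), Dom_equalizer ns → Spec_equalizer ns (equalizer ns)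

-- ===== LEMMAS AND PROOFS =====
-- gap-count measure: positive exactly when some adjacent pair differs
def pvD : List Int → Nat
  | a :: b :: rest => (if a = b then 0 else 1) + 2 * pvD (b :: rest)
  | _ => 0

-- key inequality (strengthened with the head-displacement term so the induction goes through)
lemma pvKey (ns : List Int) :
    pvD ns + 2 * pvPhi (pyAdjust ns) + ((ns.headD 0) - ((pyAdjust ns).headD 0)).natAbs
      ≤ 2 * pvPhi ns := by
  induction ns with
  | nil => simp [pvD, pvPhi, pyAdjust]
  | cons a t ih =>
    cases t with
    | nil => simp [pvD, pvPhi, pyAdjust]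
    | cons b rest =>
      simp only [pvD, pvPhi, pyAdjust, List.headD_cons] at ih ⊢
      split_ifs with h1 h2 <;>
        · simp only [List.headD_cons]
          cases hadj : pyAdjust (b :: rest) with
          | nil => rw [hadj] at ih; simp only [pvPhi, List.headD_nil] at ih ⊢; omega
          | cons b' rest' => rw [hadj] at ih; simp only [pvPhi, List.headD_cons] at ih ⊢; omega

lemma pvD_pos_of_not_allequal (ns : List Int) (h : pyAllequal ns = false) : 1 ≤ pvD ns := by
  by_contra hc
  have hd0 : pvD ns = 0 := by omega
  clear hc
  have hall : pyAllequal ns = true := by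
    cases ns with
    | nil => simp [pyAllequal]
    | cons a t =>
      simp only [pyAllequal, List.headD_cons]
      split_ifs with hl
      · simp only [List.all_cons, decide_eq_true_eq, Bool.and_eq_true]
        refine ⟨by simp, ?_⟩
        clear hl h
        induction t generalizing a with
        | nil => simp
        | cons b rest ih2 =>
          simp only [pvD] at hd0
          have hab : a = b := by
            by_cases hab : a = b
            · exact hab
            · rw [if_neg hab] at hd0; omega
          rw [if_pos hab] at hd0
          subst hab
          simpa using ih2 a (by omega)
      · rfl
  rw [h] at hall; exact Bool.false_ne_true hall

-- the measure strictly decreases on a non-all-equal round: the fuel pvPhi ns + 1 never runs out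
lemma pvPhi_adjust_lt (ns : List Int) (h : pyAllequal ns = false) :
    pvPhi (pyAdjust ns) < pvPhi ns := by
  have := pvKey ns
  have := pvD_pos_of_not_allequal ns h
  omega

lemma pvPass_snd (x0 : Int) (ns : List Int) : (pvPass x0 ns).2 = pyAdjust ns := by
  induction ns with
  | nil => simp [pvPass, pyAdjust]
  | cons a t ih =>
    cases t with
    | nil => simp [pvPass, pyAdjust]
    | cons b rest => simp only [pvPass, pyAdjust] at ih ⊢; rw [ih]; split_ifs <;> rfl

lemma pvPass_fst (ns : List Int) : (pvPass (ns.headD 0) ns).1 = pyAllequal ns := by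
  cases ns with
  | nil => simp [pvPass, pyAllequal]
  | cons a t =>
    simp only [List.headD_cons]
    have hgen : ∀ (x0 : Int) (l : List Int), (pvPass x0 l).1 = l.all (fun v => decide (v = x0)) := by
      intro x0 l
      induction l with
      | nil => simp [pvPass]
      | cons c t2 ih2 =>
        cases t2 with
        | nil => simp [pvPass]
        | cons d rest2 => simp only [pvPass, List.all_cons] at ih2 ⊢; rw [ih2]
    rw [hgen]
    cases t with
    | nil => simp [pyAllequal]
    | cons b rest => simp [pyAllequal]

-- the two loops agree step by step; the fuel bound pvPhi ns < fuel is maintained through the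
-- recursion by pvPhi_adjust_lt (so the guard of neither port ever fires)
lemma pvLoops_eq (fuel : Nat) : ∀ (ns : List Int) (c : Int), pvPhi ns < fuel →
    pyLoop fuel ns c = pvLoopB fuel ns c := by
  induction fuel with
  | zero => intro ns c h; rfl
  | succ n ih =>
    intro ns c hlt
    simp only [pyLoop, pvLoopB, pvPass_fst, pvPass_snd]
    split_ifs with h
    · rfl
    · exact ih (pyAdjust ns) (c + 1)
        (lt_of_lt_of_le (pvPhi_adjust_lt ns (by simpa using h)) (by omega))

-- ===== VERDICT (by name: the statement is the Claim_ definition above) =====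
theorem equalizer_spec : Claim_equal_equalizer := by
  intro ns _
  unfold Spec_equalizer equalizer equalizer_alt
  exact pvLoops_eq (pvPhi ns + 1) ns 0 (Nat.lt_succ_self _)
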